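-- pv_equiv track=rewrite | github.com/icesourceg/pycWiki | pycWiki/pycWiki.py | wiki_order_data
-- ===== SOURCE A (Python) =====
-- from collections import OrderedDict
--
-- def wiki_order_data(data):
--     """
--     Method to order the argument passed to Mediawiki API
--     # based on wiki decumentation 'token' should be in the last index
--     data: json data
--     return: ordered dict
--     """
--     last_field = 'token'
--     if last_field in data:
--         keys = [k for k in data.keys() if not k == last_field]
--         keys.append(last_field)
--     else:
--         keys = data.keys()
--
--     ordered = OrderedDict((k, data[k]) for k in keys)
--     return ordered
-- ===== SOURCE B (Python) =====
-- from collections import OrderedDict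
--
-- def wiki_order_data(data):
--     # Stable sort: non-'token' keys (False) keep their order first, 'token' (True) sorts last.
--     return OrderedDict(sorted(data.items(), key=lambda kv: kv[0] == 'token'))
-- ===== Notes on version B (the rewrite author's own statement) =====
-- stated objective: idiomatic
-- what changed: Replaced the membership test + key-list filter-and-append + rebuild-by-lookup with a single stable sort of the items on the boolean key (k == 'token'), building the OrderedDict directly from the sorted pairs.
import Mathlib
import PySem

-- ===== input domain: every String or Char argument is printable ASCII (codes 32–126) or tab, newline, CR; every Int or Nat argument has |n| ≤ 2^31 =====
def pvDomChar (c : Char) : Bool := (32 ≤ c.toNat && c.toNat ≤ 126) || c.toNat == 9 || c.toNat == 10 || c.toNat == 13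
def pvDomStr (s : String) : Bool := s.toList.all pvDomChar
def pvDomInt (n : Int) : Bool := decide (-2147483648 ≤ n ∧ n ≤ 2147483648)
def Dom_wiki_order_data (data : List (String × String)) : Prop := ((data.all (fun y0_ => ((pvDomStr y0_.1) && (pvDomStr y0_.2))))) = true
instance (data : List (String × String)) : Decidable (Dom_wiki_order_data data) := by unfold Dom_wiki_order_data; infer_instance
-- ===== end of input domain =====

-- B replaces A's membership-test + filter-and-append key pass with one stable sort of the
-- items on the boolean key (k == "token"); idiomatic one-liner, same return value.


-- ===== PORT A =====
-- data is a Python dict: the assoc list is materialised as a Dict (insertion order, overwrite).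
def wiki_order_data (data : List (String × String)) : List (String × String) :=
  let d := PySem.Dict.ofList data
  let keys :=
    if d.contains "token" then
      (d.keys.filter (fun k => !(k == "token"))) ++ ["token"]
    else d.keys
  -- data[k] for k drawn from data's own keys: never a KeyError, getD's default is unreachable
  keys.map (fun k => (k, d.getD k ""))

-- ===== PORT B =====
def wiki_order_data_alt (data : List (String × String)) : List (String × String) :=
  let d := PySem.Dict.ofList data
  PySem.List.sorted d.items (fun kv => kv.1 == "token") false

-- ===== PRECONDITION & SPEC =====
def Spec_wiki_order_data (data : List (String × String)) (out : List (String × String)) : Prop := out = wiki_order_data_alt data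
instance (data : List (String × String)) (out : List (String × String)) : Decidable (Spec_wiki_order_data data out) := by unfold Spec_wiki_order_data; infer_instance

-- ===== CLAIM (what is proved, stated in full; the proofs are below) =====
def Claim_equal_wiki_order_data : Prop := ∀ (data : List (String × String)), Dom_wiki_order_data data → Spec_wiki_order_data data (wiki_order_data data)

-- ===== LEMMAS AND PROOFS =====

-- insertBy with a boolean sort key: a True-key element goes to the very end
theorem insertBy_bool_true {α : Type} (key : α → Bool) (x : α) (hx : key x = true)
    (l : List α) :
    PySem.List.insertBy (fun a b => decide (key a < key b)) x l = l ++ [x] := by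
  induction l with
  | nil => rfl
  | cons y ys ih =>
      cases hy : key y <;> simp [PySem.List.insertBy, hx, hy, ih]

-- a False-key element goes right between the False block and the True block
theorem insertBy_bool_false {α : Type} (key : α → Bool) (x : α) (hx : key x = false)
    (A B : List α) (hA : ∀ a ∈ A, key a = false) (hB : ∀ b ∈ B, key b = true) :
    PySem.List.insertBy (fun a b => decide (key a < key b)) x (A ++ B) = A ++ x :: B := by
  induction A with
  | nil =>
      cases B with
      | nil => rfl
      | cons y ys =>
          have hy := hB y (by simp)
          simp [PySem.List.insertBy, hx, hy]
  | cons a A' ih =>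
      have ha := hA a (by simp)
      have hA' : ∀ a ∈ A', key a = false := fun a ha' => hA a (List.mem_cons_of_mem _ ha')
      have := ih hA'
      simp [PySem.List.insertBy, hx, ha, this]

-- the insertion-sort fold with a boolean key is a stable partition
theorem foldl_insertBy_bool {α : Type} (key : α → Bool) (l A B : List α)
    (hA : ∀ a ∈ A, key a = false) (hB : ∀ b ∈ B, key b = true) :
    l.foldl (fun acc x => PySem.List.insertBy (fun a b => decide (key a < key b)) x acc) (A ++ B)
      = (A ++ l.filter (fun x => !(key x))) ++ (B ++ l.filter key) := by
  induction l generalizing A B with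
  | nil => simp
  | cons x xs ih =>
      cases hx : key x with
      | false =>
          have h1 := insertBy_bool_false key x hx A B hA hB
          have hA' : ∀ a ∈ A ++ [x], key a = false := by
            intro a ha
            rcases List.mem_append.mp ha with h | h
            · exact hA a h
            · simp at h; subst h; exact hx
          have h2 := ih (A ++ [x]) B hA' hB
          simp only [List.foldl_cons, h1]
          have : A ++ x :: B = (A ++ [x]) ++ B := by simp
          rw [this, h2]
          simp [hx]
      | true =>
          have h1 := insertBy_bool_true key x hx (A ++ B)
          have hB' : ∀ b ∈ B ++ [x], key b = true := by
            intro b hb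
            rcases List.mem_append.mp hb with h | h
            · exact hB b h
            · simp at h; subst h; exact hx
          have h2 := ih A (B ++ [x]) hA hB'
          simp only [List.foldl_cons, h1]
          have : (A ++ B) ++ [x] = A ++ (B ++ [x]) := by simp
          rw [this, h2]
          simp [hx]

-- PySem.List.sorted with a boolean key is exactly the stable partition
theorem sorted_bool {α : Type} (l : List α) (key : α → Bool) :
    PySem.List.sorted l key false = l.filter (fun x => !(key x)) ++ l.filter key := by
  have := foldl_insertBy_bool key l [] [] (by simp) (by simp)
  simpa [PySem.List.sorted] using this

-- in a nodup key list containing "token", filtering for it yields exactly ["token"]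
theorem filter_eq_token (ks : List String) (hnd : ks.Nodup) (hmem : "token" ∈ ks) :
    ks.filter (fun k => k == "token") = ["token"] := by
  have hcount : ks.count "token" = 1 := List.count_eq_one_of_mem hnd hmem
  have : ks.filter (fun k => k == "token") = List.replicate (ks.count "token") "token" := by
    simpa using (List.filter_beq (l := ks) "token")
  rw [this, hcount]
  rfl

-- ===== VERDICT (by name: the statement is the Claim_ definition above) =====
theorem wiki_order_data_spec : Claim_equal_wiki_order_data := by
  intro data _
  unfold Spec_wiki_order_data wiki_order_data wiki_order_data_alt
  set d := PySem.Dict.ofList data with hd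
  have hnd : d.keys.Nodup := PySem.Dict.nodup_keys_ofList data
  have hitems : d.items = d.keys.map (fun k => (k, d.getD k "")) :=
    PySem.Dict.items_eq_map_keys d hnd ""
  rw [sorted_bool]
  have hs : ∀ (p : String → Bool),
      d.items.filter (fun kv => p kv.1) = (d.keys.filter p).map (fun k => (k, d.getD k "")) := by
    intro p
    rw [hitems, List.filter_map]
    rfl
  by_cases hc : d.contains "token" = true
  · have hmem : "token" ∈ d.keys := (PySem.Dict.contains_iff_mem_keys d "token").mp hc
    have hfy : d.items.filter (fun kv => kv.1 == "token")
        = [("token", d.getD "token" "")] := by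
      rw [hs (fun k => k == "token"), filter_eq_token d.keys hnd hmem]
      rfl
    have hfn : d.items.filter (fun kv => !(kv.1 == "token"))
        = (d.keys.filter (fun k => !(k == "token"))).map (fun k => (k, d.getD k "")) :=
      hs (fun k => !(k == "token"))
    simp only [hc, if_true, hfy, hfn, List.map_append]
    rfl
  · have hc' : d.contains "token" = false := by simpa using hc
    have hnomem : "token" ∉ d.keys := by
      intro hmem
      rw [(PySem.Dict.contains_iff_mem_keys d "token").mpr hmem] at hc'
      simp at hc'
    have hfy : d.items.filter (fun kv => kv.1 == "token") = [] := by
      rw [hs (fun k => k == "token")]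
      have : d.keys.filter (fun k => k == "token") = [] := by
        apply List.filter_eq_nil_iff.mpr
        intro k hk hkb
        exact hnomem (by simpa using (beq_iff_eq.mp hkb) ▸ hk)
      rw [this]; rfl
    have hfn : d.items.filter (fun kv => !(kv.1 == "token")) = d.items := by
      apply List.filter_eq_self.mpr
      intro kv hkv
      have : kv.1 ∈ d.keys := PySem.Dict.mem_keys_of_mem_items d hkv
      simp only [Bool.not_eq_eq_eq_not, Bool.not_true, beq_eq_false_iff_ne, ne_eq]
      intro h; rw [h] at this; exact hnomem this
    simp only [hc', Bool.false_eq_true, if_false, hfy, hfn, List.append_nil]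
    exact hitems.symm
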